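-- pv_equiv track=rewrite | github.com/syrifgit/full-task-scraper | scripts/wiki_cache.py | strip_templates
-- ===== SOURCE A (Python) =====
-- def strip_templates(value):
--     """Remove nested {{...}} templates from a value string."""
--     result = []
--     depth = 0
--     i = 0
--     while i < len(value):
--         if value[i:i+2] == "{{":
--             depth += 1
--             i += 2
--         elif value[i:i+2] == "}}":
--             depth -= 1
--             i += 2
--         elif depth == 0:
--             result.append(value[i])
--             i += 1
--         else:
--             i += 1
--     return "".join(result).strip()
-- ===== SOURCE B (Python) =====
-- def strip_templates(value):
--     """Remove nested {{...}} templates from a value string."""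
--     segs = []
--     depth = 0
--     s = value
--     while True:
--         o = s.find("{{")
--         c = s.find("}}")
--         if o == -1 and c == -1:
--             if depth == 0:
--                 segs.append(s)
--             break
--         if c == -1 or (o != -1 and o < c):
--             j, d = o, 1
--         else:
--             j, d = c, -1
--         if depth == 0:
--             segs.append(s[:j])
--         depth += d
--         s = s[j + 2:]
--     return "".join(segs).strip()
-- ===== Notes on version B (the rewrite author's own statement) =====
-- stated objective: faster
-- what changed: B replaces A's character-by-character scan (which slices a two-character window at every position) with a marker-jumping loop: str.find locates the earliest double-brace open or close marker, whole segments between markers are appended when depth is 0, and the loop jumps past each marker, so Python-level work is proportional to the number of markers instead of the number of characters.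
import Mathlib
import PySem

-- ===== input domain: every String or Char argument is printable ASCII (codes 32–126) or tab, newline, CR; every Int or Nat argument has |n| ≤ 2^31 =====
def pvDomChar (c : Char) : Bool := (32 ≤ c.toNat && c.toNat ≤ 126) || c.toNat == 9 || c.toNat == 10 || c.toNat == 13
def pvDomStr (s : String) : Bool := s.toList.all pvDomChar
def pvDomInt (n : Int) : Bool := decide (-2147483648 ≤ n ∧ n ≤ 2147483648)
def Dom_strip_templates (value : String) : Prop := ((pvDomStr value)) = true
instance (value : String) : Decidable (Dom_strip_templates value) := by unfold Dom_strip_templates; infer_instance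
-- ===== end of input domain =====

-- B replaces A's per-character scan with a find-based marker-jumping loop.

-- ===== PORT A =====
-- A's while loop over index i, transcribed as structural recursion on the remaining
-- characters (value[i:]): the test value[i:i+2] == "{{" is the test on the first two chars.
def stGoA : List Char → Int → List Char
  | [], _ => []
  | [x], d => if d = 0 then [x] else []
  | x :: y :: r, d =>
    if x = '{' ∧ y = '{' then stGoA r (d + 1)
    else if x = '}' ∧ y = '}' then stGoA r (d - 1)
    else if d = 0 then x :: stGoA (y :: r) d
    else stGoA (y :: r) d

-- "".join(result) of single-character strings is the char list itself; .strip() = PySem.Chars.strip.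
def strip_templates (value : String) : String :=
  String.ofList (PySem.Chars.strip (stGoA value.toList 0))

-- ===== PORT B =====
-- B's while loop over the remaining string s, transcribed as recursion on s:
-- find the earliest "{{" / "}}", emit the segment before it when depth == 0, jump past it.
-- The fuel counter only makes the recursion structural (each iteration consumes at least
-- two characters, so s.length + 1 steps always suffice); it changes no computed value.
def stGoBF : Nat → List Char → Int → List Char
  | 0, _, _ => []
  | fuel + 1, s, depth =>
    if PySem.Chars.find s ['{', '{'] = -1 ∧ PySem.Chars.find s ['}', '}'] = -1 then
      (if depth = 0 then s else [])
    else if PySem.Chars.find s ['}', '}'] = -1 ∨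
        (PySem.Chars.find s ['{', '{'] ≠ -1 ∧
          PySem.Chars.find s ['{', '{'] < PySem.Chars.find s ['}', '}']) then
      -- j, d = o, 1
      (if depth = 0 then PySem.List.slice s none (some (PySem.Chars.find s ['{', '{'])) else []) ++
        stGoBF fuel (PySem.List.slice s (some (PySem.Chars.find s ['{', '{'] + 2)) none) (depth + 1)
    else
      -- j, d = c, -1
      (if depth = 0 then PySem.List.slice s none (some (PySem.Chars.find s ['}', '}'])) else []) ++
        stGoBF fuel (PySem.List.slice s (some (PySem.Chars.find s ['}', '}'] + 2)) none) (depth - 1)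

def stGoB (s : List Char) (depth : Int) : List Char :=
  stGoBF (s.length + 1) s depth

def strip_templates_alt (value : String) : String :=
  String.ofList (PySem.Chars.strip (stGoB value.toList 0))

-- ===== PRECONDITION & SPEC =====
def Spec_strip_templates (value : String) (out : String) : Prop := out = strip_templates_alt value
instance (value : String) (out : String) : Decidable (Spec_strip_templates value out) := by unfold Spec_strip_templates; infer_instance

-- ===== CLAIM (what is proved, stated in full; the proofs are below) =====
def Claim_equal_strip_templates : Prop := ∀ (value : String), Dom_strip_templates value → Spec_strip_templates value (strip_templates value)

-- ===== LEMMAS AND PROOFS =====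

theorem stFind2_bound (s : List Char) (a b : Char)
    (h : PySem.Chars.find s [a, b] ≠ -1) :
    (PySem.Chars.find s [a, b]).toNat + 2 ≤ s.length := by
  have hnn : 0 ≤ PySem.Chars.find s [a, b] := by
    have := PySem.Chars.neg_one_le_find (s := s) (sub := [a, b])
    omega
  have hpre := (PySem.Chars.find_spec (s := s) (sub := [a, b]) hnn).1
  have hlen := hpre.length_le
  simp only [List.length_cons, List.length_nil, List.length_drop] at hlen
  have := PySem.Chars.find_le_length (s := s) (sub := [a, b])
  omega


-- a two-char marker "ab" starts at position k of s
def stPairAt (a b : Char) (s : List Char) (k : Nat) : Prop :=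
  s[k]? = some a ∧ s[k + 1]? = some b

-- no marker (of either kind) starts at position k
def stNoMark (s : List Char) (k : Nat) : Prop :=
  ¬ stPairAt '{' '{' s k ∧ ¬ stPairAt '}' '}' s k

theorem stPrefix_iff_pairAt (a b : Char) (s : List Char) (k : Nat) :
    [a, b] <+: s.drop k ↔ stPairAt a b s k := by
  unfold stPairAt
  have e0 : s[k]? = (s.drop k)[0]? := by simp [List.getElem?_drop]
  have e1 : s[k + 1]? = (s.drop k)[1]? := by simp [List.getElem?_drop]
  rw [e0, e1]
  cases h : s.drop k with
  | nil => simp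
  | cons x t =>
    cases t with
    | nil => simp [List.cons_prefix_cons]
    | cons y u => simp [List.cons_prefix_cons, eq_comm]

theorem stPairAt_drop (a b : Char) (s : List Char) (k : Nat) (h : stPairAt a b s k) :
    s.drop k = a :: b :: s.drop (k + 2) := by
  obtain ⟨h1, h2⟩ := h
  have hk : k < s.length := (List.getElem?_eq_some_iff.mp h1).1
  have hk1 : k + 1 < s.length := (List.getElem?_eq_some_iff.mp h2).1
  have e1 : s[k] = a := by
    have := List.getElem?_eq_getElem (l := s) hk
    rw [this] at h1; exact Option.some.inj h1
  have e2 : s[k + 1] = b := by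
    have := List.getElem?_eq_getElem (l := s) hk1
    rw [this] at h2; exact Option.some.inj h2
  rw [List.drop_eq_getElem_cons hk, List.drop_eq_getElem_cons hk1, e1, e2]

-- A emits an unmarked segment wholesale
theorem stGoA_seg : ∀ (j : Nat) (s : List Char) (d : Int),
    (∀ k, k < j → stNoMark s k) →
    stGoA s d = (if d = 0 then s.take j else []) ++ stGoA (s.drop j) d := by
  intro j
  induction j with
  | zero =>
    intro s d _
    split_ifs <;> simp
  | succ j ih =>
    intro s d h
    cases s with
    | nil => simp [stGoA]
    | cons x r =>
      cases r with
      | nil =>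
        simp only [stGoA, List.take_succ_cons, List.drop_succ_cons,
          List.take_nil, List.drop_nil]
        cases j <;> split_ifs <;> simp
      | cons y u =>
        have h0 := h 0 (Nat.succ_pos j)
        have hx1 : ¬(x = '{' ∧ y = '{') := by
          intro hh
          exact h0.1 ⟨by simp [hh.1], by simp [hh.2]⟩
        have hx2 : ¬(x = '}' ∧ y = '}') := by
          intro hh
          exact h0.2 ⟨by simp [hh.1], by simp [hh.2]⟩
        have hshift : ∀ k, k < j → stNoMark (y :: u) k := by
          intro k hk
          have := h (k + 1) (by omega)
          unfold stNoMark stPairAt at this ⊢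
          simpa using this
        have ih' := ih (y :: u) d hshift
        simp only [stGoA, if_neg hx1, if_neg hx2, List.take_succ_cons,
          List.drop_succ_cons]
        split_ifs with hd
        · rw [ih', if_pos hd]; simp
        · rw [ih', if_neg hd]

theorem stInfix_of_pairAt (a b : Char) (s : List Char) (k : Nat)
    (h : stPairAt a b s k) : [a, b] <:+: s := by
  obtain ⟨t, ht⟩ := (stPrefix_iff_pairAt a b s k).mpr h
  refine ⟨s.take k, t, ?_⟩
  rw [List.append_assoc, ht, List.take_append_drop]

theorem stNoMark_of_no_find (s : List Char)
    (ho : PySem.Chars.find s ['{', '{'] = -1)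
    (hc : PySem.Chars.find s ['}', '}'] = -1) :
    ∀ k, stNoMark s k := by
  intro k
  have ho' := (PySem.Chars.find_eq_neg_one_iff _ _).mp ho
  have hc' := (PySem.Chars.find_eq_neg_one_iff _ _).mp hc
  constructor
  · intro hp
    exact ho' (stInfix_of_pairAt '{' '{' s k hp)
  · intro hp
    exact hc' (stInfix_of_pairAt '}' '}' s k hp)

theorem stGoA_open (t : List Char) (d : Int) : stGoA ('{' :: '{' :: t) d = stGoA t (d + 1) := by
  simp [stGoA]

theorem stGoA_close (t : List Char) (d : Int) : stGoA ('}' :: '}' :: t) d = stGoA t (d - 1) := by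
  simp [stGoA]

theorem stGoA_eq_stGoB_aux : ∀ (n : Nat) (s : List Char) (d : Int),
    s.length < n → stGoA s d = stGoBF n s d := by
  intro n
  induction n with
  | zero =>
    intro s d hlen
    exact absurd hlen (Nat.not_lt_zero _)
  | succ n ih =>
    intro s d hlen
    by_cases ho : PySem.Chars.find s ['{', '{'] = -1 ∧ PySem.Chars.find s ['}', '}'] = -1
    · -- no marker anywhere: A emits the whole string iff depth = 0
      have hno := stNoMark_of_no_find s ho.1 ho.2
      have := stGoA_seg s.length s d (fun k _ => hno k)
      rw [stGoBF, if_pos ho]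
      simpa [stGoA] using this
    · rw [stGoBF, if_neg ho]
      by_cases hoc : PySem.Chars.find s ['}', '}'] = -1 ∨
          (PySem.Chars.find s ['{', '{'] ≠ -1 ∧
            PySem.Chars.find s ['{', '{'] < PySem.Chars.find s ['}', '}'])
      · -- the earliest marker is an opener "{{" at index o
        rw [if_pos hoc]
        have hone : PySem.Chars.find s ['{', '{'] ≠ -1 := by
          rcases hoc with h1 | h1
          · intro hx; exact ho ⟨hx, h1⟩
          · exact h1.1
        have honn : 0 ≤ PySem.Chars.find s ['{', '{'] := by
          have := PySem.Chars.neg_one_le_find (s := s) (sub := ['{', '{'])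
          omega
        obtain ⟨hpre, hmin⟩ := PySem.Chars.find_spec (s := s) (sub := ['{', '{']) honn
        have hpair : stPairAt '{' '{' s (PySem.Chars.find s ['{', '{']).toNat :=
          (stPrefix_iff_pairAt _ _ _ _).mp hpre
        have hseg : ∀ k, k < (PySem.Chars.find s ['{', '{']).toNat → stNoMark s k := by
          intro k hk
          constructor
          · intro hp
            exact hmin k hk ((stPrefix_iff_pairAt _ _ _ _).mpr hp)
          · intro hp
            rcases hoc with h1 | h1
            · exact (PySem.Chars.find_eq_neg_one_iff _ _).mp h1
                (stInfix_of_pairAt '}' '}' s k hp)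
            · have hcnn : 0 ≤ PySem.Chars.find s ['}', '}'] := by
                have := PySem.Chars.neg_one_le_find (s := s) (sub := ['}', '}'])
                rcases h1 with ⟨_, hlt⟩
                omega
              have hcmin := (PySem.Chars.find_spec (s := s) (sub := ['}', '}']) hcnn).2
              exact hcmin k (by omega) ((stPrefix_iff_pairAt _ _ _ _).mpr hp)
        have hbound := stFind2_bound s '{' '{' hone
        rw [stGoA_seg (PySem.Chars.find s ['{', '{']).toNat s d hseg,
          stPairAt_drop _ _ _ _ hpair]
        have e2 : (PySem.Chars.find s ['{', '{'] + 2).toNat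
            = (PySem.Chars.find s ['{', '{']).toNat + 2 := by omega
        rw [PySem.List.slice_to s honn,
          PySem.List.slice_from s (a := PySem.Chars.find s ['{', '{'] + 2) (by omega), e2]
        have ihd := ih (s.drop ((PySem.Chars.find s ['{', '{']).toNat + 2)) (d + 1)
          (by simp only [List.length_drop]; omega)
        rw [stGoA_open, ihd]
      · -- the earliest marker is a closer "}}" at index c
        rw [if_neg hoc]
        have hcne : PySem.Chars.find s ['}', '}'] ≠ -1 := fun hx => hoc (Or.inl hx)
        have hcnn : 0 ≤ PySem.Chars.find s ['}', '}'] := by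
          have := PySem.Chars.neg_one_le_find (s := s) (sub := ['}', '}'])
          omega
        obtain ⟨hpre, hmin⟩ := PySem.Chars.find_spec (s := s) (sub := ['}', '}']) hcnn
        have hpair : stPairAt '}' '}' s (PySem.Chars.find s ['}', '}']).toNat :=
          (stPrefix_iff_pairAt _ _ _ _).mp hpre
        have hseg : ∀ k, k < (PySem.Chars.find s ['}', '}']).toNat → stNoMark s k := by
          intro k hk
          constructor
          · intro hp
            by_cases h1 : PySem.Chars.find s ['{', '{'] = -1
            · exact (PySem.Chars.find_eq_neg_one_iff _ _).mp h1
                (stInfix_of_pairAt '{' '{' s k hp)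
            · have honn : 0 ≤ PySem.Chars.find s ['{', '{'] := by
                have := PySem.Chars.neg_one_le_find (s := s) (sub := ['{', '{'])
                omega
              have homin := (PySem.Chars.find_spec (s := s) (sub := ['{', '{']) honn).2
              have hge : ¬ PySem.Chars.find s ['{', '{'] < PySem.Chars.find s ['}', '}'] :=
                fun hlt => hoc (Or.inr ⟨h1, hlt⟩)
              exact homin k (by omega) ((stPrefix_iff_pairAt _ _ _ _).mpr hp)
          · intro hp
            exact hmin k hk ((stPrefix_iff_pairAt _ _ _ _).mpr hp)
        have hbound := stFind2_bound s '}' '}' hcne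
        rw [stGoA_seg (PySem.Chars.find s ['}', '}']).toNat s d hseg,
          stPairAt_drop _ _ _ _ hpair]
        have e2 : (PySem.Chars.find s ['}', '}'] + 2).toNat
            = (PySem.Chars.find s ['}', '}']).toNat + 2 := by omega
        rw [PySem.List.slice_to s hcnn,
          PySem.List.slice_from s (a := PySem.Chars.find s ['}', '}'] + 2) (by omega), e2]
        have ihd := ih (s.drop ((PySem.Chars.find s ['}', '}']).toNat + 2)) (d - 1)
          (by simp only [List.length_drop]; omega)
        rw [stGoA_close, ihd]

theorem stGoA_eq_stGoB (s : List Char) (d : Int) : stGoA s d = stGoB s d :=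
  stGoA_eq_stGoB_aux (s.length + 1) s d (Nat.lt_succ_self _)

-- ===== VERDICT (by name: the statement is the Claim_ definition above) =====
theorem strip_templates_spec : Claim_equal_strip_templates := by
  intro value _
  unfold Spec_strip_templates strip_templates strip_templates_alt
  rw [stGoA_eq_stGoB]
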